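-- pv_equiv track=rewrite | github.com/xiaoxiaojiangshang/LeetCode | leetcode_python/Find_the_Shortest_Superstring_943.py | calculate_suffix
-- ===== SOURCE A (Python) =====
-- def calculate_suffix(word1,word2):
--     word1_len,word2_len = len(word1),len(word2)
--     if word1_len < word2_len:
--         word2 += (word1_len-word2_len)*'#'
--     for i in range(word1_len):
--         common_len = len(word1[i:])
--         if word1[i:] == word2[:common_len]:
--             return common_len, word1 + word2[common_len:].replace('#','')
--     return 0, word1 + word2.replace('#','')
-- ===== SOURCE B (Python) =====
-- def calculate_suffix(word1, word2):
--     # KMP: failure table for word2, then stream word1 through the matcher.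
--     # Final state q = length of the longest prefix of word2 that is a suffix of word1.
--     p = word2
--     n = len(p)
--     fail = [0] if p else []
--     k = 0
--     for c in p[1:]:
--         while k and c != p[k]:
--             k = fail[k - 1]
--         if c == p[k]:
--             k += 1
--         fail.append(k)
--     q = 0
--     for c in word1:
--         while q and (q == n or c != p[q]):
--             q = fail[q - 1]
--         if q < n and c == p[q]:
--             q += 1
--     return q, word1 + word2[q:].replace('#', '')
-- ===== Notes on version B (the rewrite author's own statement) =====
-- stated objective: faster
-- what changed: Replaces A's quadratic scan that slices every suffix of word1 and compares it against a prefix of word2 with a linear KMP failure-function matcher that streams word1 through word2's prefix automaton (A's '#'-padding branch is dead code and dropped; the '#'-stripping of word2's appended tail is kept as part of the function's behaviour).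
import Mathlib
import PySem

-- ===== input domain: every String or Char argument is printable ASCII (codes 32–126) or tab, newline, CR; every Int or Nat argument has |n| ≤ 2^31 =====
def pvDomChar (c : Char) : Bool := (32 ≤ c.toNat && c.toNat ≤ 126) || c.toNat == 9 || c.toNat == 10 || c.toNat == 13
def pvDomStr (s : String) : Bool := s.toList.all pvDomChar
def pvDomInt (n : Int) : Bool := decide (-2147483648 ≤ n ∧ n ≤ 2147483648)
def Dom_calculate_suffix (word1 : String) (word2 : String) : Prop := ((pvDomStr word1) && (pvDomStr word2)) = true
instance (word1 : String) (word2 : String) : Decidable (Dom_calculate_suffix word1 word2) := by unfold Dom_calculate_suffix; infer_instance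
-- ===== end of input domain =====

-- B replaces A's quadratic suffix-slice scan by a linear KMP failure-function matcher (objective: faster);
-- like A it appends word2's tail with '#' stripped ('.replace('#','')'), which is part of the function's behaviour.

-- ===== PORT A =====
-- the loop 'for i in range(word1_len): common_len = len(word1[i:]); if word1[i:] == word2[:common_len]: return …'
-- word1[i:] (i ≥ 0) is List.drop i, word2[:common_len] is List.take common_len (PySem.List.slice_from_natCast / slice_to_natCast);
-- s.replace('#','') is PySem.Chars.replace s ['#'] []
def pvALoop (w1 w2 : List Char) : List Nat → Int × String
  | [] => (0, String.ofList (w1 ++ PySem.Chars.replace w2 ['#'] []))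
  | i :: rest =>
    let common_len := (w1.drop i).length
    if w1.drop i = w2.take common_len then
      ((common_len : Int), String.ofList (w1 ++ PySem.Chars.replace (w2.drop common_len) ['#'] []))
    else pvALoop w1 w2 rest

def calculate_suffix (word1 : String) (word2 : String) : Int × String :=
  let w1 := word1.toList
  let w2 := word2.toList
  -- 'if word1_len < word2_len: word2 += (word1_len-word2_len)*'#'' — the multiplier is negative there,
  -- so Python appends the empty string: n*'#' for n ≤ 0 is List.replicate n.toNat '#' = []
  let w2 := if w1.length < w2.length then w2 ++ List.replicate (((w1.length : Int) - (w2.length : Int)).toNat) '#' else w2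
  pvALoop w1 w2 (List.range w1.length)

-- ===== PORT B =====
-- 'while q and (q == n or c != p[q]): q = fail[q-1]' — fuel-counted recursion; fuel = starting q is always
-- enough because every stored failure value is < its index (proved below: the chase strictly decreases q).
-- p[q] is read via getD; Python only evaluates p[q] when q < n (short-circuit), and on every run the
-- default is never used (q < n whenever the test is reached with q ≠ 0 and q ≠ n).
def pvChaseS (p : List Char) (fl : List Nat) (c : Char) : Nat → Nat → Nat
  | 0, q => q
  | fuel + 1, q => if q ≠ 0 ∧ (q = p.length ∨ c ≠ p.getD q ' ') then pvChaseS p fl c fuel (fl.getD (q - 1) 0) else q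

-- 'while k and c != p[k]: k = fail[k-1]' (the failure-table building loop; k < len(p) throughout)
def pvChaseF (p : List Char) (fl : List Nat) (c : Char) : Nat → Nat → Nat
  | 0, k => k
  | fuel + 1, k => if k ≠ 0 ∧ c ≠ p.getD k ' ' then pvChaseF p fl c fuel (fl.getD (k - 1) 0) else k

-- 'for c in p[1:]: …; fail.append(k)'
def pvFailGo (p : List Char) : List Char → List Nat → Nat → List Nat
  | [], fl, _ => fl
  | c :: rest, fl, k =>
    let k1 := pvChaseF p fl c k k
    let k2 := if c = p.getD k1 ' ' then k1 + 1 else k1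
    pvFailGo p rest (fl ++ [k2]) k2

-- 'fail = [0] if p else []' then the loop over p[1:]
def pvFail (p : List Char) : List Nat :=
  match p with
  | [] => []
  | _ :: rest => pvFailGo p rest [0] 0

-- 'for c in word1: …'
def pvStreamGo (p : List Char) (fl : List Nat) : List Char → Nat → Nat
  | [], q => q
  | c :: rest, q =>
    let q1 := pvChaseS p fl c q q
    let q2 := if q1 < p.length ∧ c = p.getD q1 ' ' then q1 + 1 else q1
    pvStreamGo p fl rest q2

def calculate_suffix_alt (word1 : String) (word2 : String) : Int × String :=
  let p := word2.toList
  let fl := pvFail p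
  let q := pvStreamGo p fl word1.toList 0
  ((q : Int), String.ofList (word1.toList ++ PySem.Chars.replace (p.drop q) ['#'] []))

-- ===== PRECONDITION & SPEC =====
def Spec_calculate_suffix (word1 : String) (word2 : String) (out : Int × String) : Prop := out = calculate_suffix_alt word1 word2
instance (word1 : String) (word2 : String) (out : Int × String) : Decidable (Spec_calculate_suffix word1 word2 out) := by unfold Spec_calculate_suffix; infer_instance

-- ===== CLAIM (what is proved, stated in full; the proofs are below) =====
def Claim_equal_calculate_suffix : Prop := ∀ (word1 : String) (word2 : String), Dom_calculate_suffix word1 word2 → Spec_calculate_suffix word1 word2 (calculate_suffix word1 word2)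

-- ===== LEMMAS AND PROOFS =====

-- the largest k ≤ |p| with (p.take k) a suffix of u — what both programs compute
def pvKOf (p u : List Char) : Nat := Nat.findGreatest (fun k => k ≤ p.length ∧ p.take k <:+ u) u.length
-- the longest proper border of p.take j (prefix of p that is a proper suffix of p.take j)
def pvBord (p : List Char) (j : Nat) : Nat := Nat.findGreatest (fun k => k < j ∧ p.take k <:+ p.take j) j

theorem pv_sufsuf {s t u : List Char} (hs : s <:+ u) (ht : t <:+ u) (hl : s.length ≤ t.length) : s <:+ t := by
  rw [← List.reverse_prefix] at hs ht ⊢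
  exact List.prefix_of_prefix_length_le hs ht (by simpa using hl)


theorem pv_snoc_suffix_snoc {xs ys : List Char} {a b : Char} : xs ++ [a] <:+ ys ++ [b] ↔ xs <:+ ys ∧ a = b := by
  rw [← List.reverse_prefix, List.reverse_append, List.reverse_append]
  simp only [List.reverse_singleton, List.singleton_append, List.cons_prefix_cons, List.reverse_prefix]
  tauto


theorem pv_take_succ (p : List Char) (r : Nat) (hr : r < p.length) : p.take (r + 1) = p.take r ++ [p.getD r ' '] := by
  rw [List.take_add_one]
  simp [List.getElem?_eq_getElem hr, List.getD_eq_getElem?_getD, Option.toList]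


theorem pvKOf_cand (p u : List Char) : pvKOf p u ≤ p.length ∧ p.take (pvKOf p u) <:+ u := by
  unfold pvKOf
  exact Nat.findGreatest_spec (P := fun k => k ≤ p.length ∧ p.take k <:+ u) (m := 0) (Nat.zero_le _) ⟨Nat.zero_le _, by simp [List.nil_suffix]⟩


theorem pvKOf_max (p u : List Char) {k : Nat} (hk : k ≤ p.length) (hs : p.take k <:+ u) : k ≤ pvKOf p u := by
  have hlen : k ≤ u.length := by
    have := hs.length_le
    simpa [List.length_take, Nat.min_eq_left hk] using this
  exact Nat.le_findGreatest hlen ⟨hk, hs⟩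


theorem pvBord_prop (p : List Char) (j : Nat) (hj : 0 < j) : pvBord p j < j ∧ p.take (pvBord p j) <:+ p.take j := by
  unfold pvBord
  exact Nat.findGreatest_spec (P := fun k => k < j ∧ p.take k <:+ p.take j) (m := 0) (Nat.zero_le _) ⟨hj, by simp [List.nil_suffix]⟩


theorem pvBord_max (p : List Char) {j k : Nat} (hk : k < j) (hs : p.take k <:+ p.take j) : k ≤ pvBord p j := by
  exact Nat.le_findGreatest (Nat.le_of_lt hk) ⟨hk, hs⟩


theorem pvChaseS_spec (p : List Char) (fl : List Nat) (c : Char) (u : List Char) :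
    ∀ q fuel, q ≤ fuel → q ≤ p.length → p.take q <:+ u →
    (∀ t, t < q → fl.getD t 0 = pvBord p (t + 1)) →
    (pvChaseS p fl c fuel q ≤ q ∧ pvChaseS p fl c fuel q ≤ p.length ∧
     p.take (pvChaseS p fl c fuel q) <:+ u ∧
     (pvChaseS p fl c fuel q = 0 ∨ (pvChaseS p fl c fuel q < p.length ∧ p.getD (pvChaseS p fl c fuel q) ' ' = c)) ∧
     (∀ k, k ≤ q → p.take k <:+ u → k < p.length → p.getD k ' ' = c → k ≤ pvChaseS p fl c fuel q)) := by
  intro q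
  induction q using Nat.strong_induction_on with
  | _ q IH =>
    intro fuel hfuel hqm hsuf Hfl
    match fuel with
    | 0 =>
      have hq0 : q = 0 := by omega
      subst hq0
      refine ⟨Nat.le_refl _, Nat.zero_le _, by simp [pvChaseS, List.nil_suffix], Or.inl rfl, fun k hk _ _ _ => hk⟩
    | fuel + 1 =>
      simp only [pvChaseS]
      by_cases h : q ≠ 0 ∧ (q = p.length ∨ c ≠ p.getD q ' ')
      · rw [if_pos h]
        have hq0 : 0 < q := Nat.pos_of_ne_zero h.1
        have hflq : fl.getD (q - 1) 0 = pvBord p q := by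
          have := Hfl (q - 1) (by omega)
          rwa [Nat.sub_add_cancel hq0] at this
        have hb := pvBord_prop p q hq0
        rw [hflq]
        have hsuf' : p.take (pvBord p q) <:+ u := hb.2.trans hsuf
        have IHr := IH (pvBord p q) hb.1 fuel (by omega) (by omega) hsuf' (fun t ht => Hfl t (by omega))
        obtain ⟨r1, r2, r3, r4, r5⟩ := IHr
        refine ⟨by omega, r2, r3, r4, ?_⟩
        intro k hk hks hkm hkc
        rcases Nat.lt_or_ge k q with hkq | hkq
        · rcases Nat.lt_or_ge (pvBord p q) k with hqk | hqk
          · exfalso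
            have hst : p.take k <:+ p.take q := by
              refine pv_sufsuf hks hsuf ?_
              simp only [List.length_take]
              omega
            have := pvBord_max p hkq hst
            omega
          · exact r5 k hqk hks hkm hkc
        · have hkq' : k = q := by omega
          subst hkq'
          rcases h.2 with hm | hc
          · omega
          · exact absurd hkc (fun hh => hc hh.symm)
      · rw [if_neg h]
        push Not at h
        refine ⟨Nat.le_refl _, hqm, hsuf, ?_, fun k hk _ _ _ => hk⟩
        by_cases hq0 : q = 0
        · exact Or.inl hq0
        · exact Or.inr ⟨by have := (h hq0).1; omega, ((h hq0).2).symm⟩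

theorem pvChaseF_eq (p : List Char) (fl : List Nat) (c : Char) :
    ∀ q fuel, q ≤ fuel → q < p.length →
    (∀ t, t < q → fl.getD t 0 = pvBord p (t + 1)) →
    pvChaseF p fl c fuel q = pvChaseS p fl c fuel q := by
  intro q
  induction q using Nat.strong_induction_on with
  | _ q IH =>
    intro fuel hfuel hqm Hfl
    match fuel with
    | 0 => rfl
    | fuel + 1 =>
      simp only [pvChaseF, pvChaseS]
      by_cases h : q ≠ 0 ∧ c ≠ p.getD q ' '
      · have hS : q ≠ 0 ∧ (q = p.length ∨ c ≠ p.getD q ' ') := ⟨h.1, Or.inr h.2⟩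
        rw [if_pos h, if_pos hS]
        have hq0 : 0 < q := Nat.pos_of_ne_zero h.1
        have hflq : fl.getD (q - 1) 0 = pvBord p q := by
          have := Hfl (q - 1) (by omega)
          rwa [Nat.sub_add_cancel hq0] at this
        rw [hflq]
        have hb := pvBord_prop p q hq0
        exact IH (pvBord p q) hb.1 fuel (by omega) (by omega) (fun t ht => Hfl t (by omega))
      · have hS : ¬(q ≠ 0 ∧ (q = p.length ∨ c ≠ p.getD q ' ')) := by
          intro hh
          apply h
          refine ⟨hh.1, ?_⟩
          rcases hh.2 with hm | hc
          · omega
          · exact hc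
        rw [if_neg h, if_neg hS]


theorem pvStep_spec (p : List Char) (fl : List Nat) (c : Char) (u : List Char)
    (Hfl : ∀ t, t < p.length → fl.getD t 0 = pvBord p (t + 1)) :
    (if pvChaseS p fl c (pvKOf p u) (pvKOf p u) < p.length ∧ c = p.getD (pvChaseS p fl c (pvKOf p u) (pvKOf p u)) ' '
     then pvChaseS p fl c (pvKOf p u) (pvKOf p u) + 1 else pvChaseS p fl c (pvKOf p u) (pvKOf p u)) = pvKOf p (u ++ [c]) := by
  have hcq := pvKOf_cand p u
  have H := pvChaseS_spec p fl c u (pvKOf p u) (pvKOf p u) (Nat.le_refl _) hcq.1 hcq.2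
    (fun t ht => Hfl t (lt_of_lt_of_le ht hcq.1))
  set r := pvChaseS p fl c (pvKOf p u) (pvKOf p u) with hrdef
  obtain ⟨r1, r2, r3, r4, r5⟩ := H
  have hcK := pvKOf_cand p (u ++ [c])
  set K := pvKOf p (u ++ [c]) with hKdef
  by_cases hif : r < p.length ∧ c = p.getD r ' '
  · rw [if_pos hif]
    apply Nat.le_antisymm
    · apply pvKOf_max p (u ++ [c]) hif.1
      rw [pv_take_succ p r hif.1]
      exact pv_snoc_suffix_snoc.mpr ⟨r3, hif.2.symm⟩
    · by_cases hK0 : K = 0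
      · omega
      · have hK1 : 1 ≤ K := Nat.pos_of_ne_zero hK0
        have hKm : K - 1 < p.length := by omega
        have hdec : p.take K = p.take (K - 1) ++ [p.getD (K - 1) ' '] := by
          have := pv_take_succ p (K - 1) hKm
          rwa [Nat.sub_add_cancel hK1] at this
        have hsp := hcK.2
        rw [hdec] at hsp
        obtain ⟨hsufK, heq⟩ := pv_snoc_suffix_snoc.mp hsp
        have h1 : K - 1 ≤ pvKOf p u := pvKOf_max p u (by omega) hsufK
        have h2 : K - 1 ≤ r := r5 (K - 1) h1 hsufK hKm heq
        omega
  · rw [if_neg hif]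
    have hr0 : r = 0 := by
      rcases r4 with h0 | hmc
      · exact h0
      · exact absurd ⟨hmc.1, hmc.2.symm⟩ hif
    apply Nat.le_antisymm
    · omega
    · by_cases hK0 : K = 0
      · omega
      · exfalso
        have hK1 : 1 ≤ K := Nat.pos_of_ne_zero hK0
        have hKm : K - 1 < p.length := by omega
        have hdec : p.take K = p.take (K - 1) ++ [p.getD (K - 1) ' '] := by
          have := pv_take_succ p (K - 1) hKm
          rwa [Nat.sub_add_cancel hK1] at this
        have hsp := hcK.2
        rw [hdec] at hsp
        obtain ⟨hsufK, heq⟩ := pv_snoc_suffix_snoc.mp hsp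
        have h1 : K - 1 ≤ pvKOf p u := pvKOf_max p u (by omega) hsufK
        have h2 : K - 1 ≤ r := r5 (K - 1) h1 hsufK hKm heq
        have hK1' : K = 1 := by omega
        have h00 : K - 1 = 0 := by omega
        rw [h00] at heq hKm
        exact hif ⟨by omega, by rw [hr0]; exact heq.symm⟩


theorem pvStepF_spec (p : List Char) (fl : List Nat) (c : Char) (i : Nat)
    (hi1 : 1 ≤ i) (him : i < p.length) (hc : c = p.getD i ' ')
    (Hfl : ∀ t, t < i → fl.getD t 0 = pvBord p (t + 1)) :
    (if c = p.getD (pvChaseF p fl c (pvBord p i) (pvBord p i)) ' '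
     then pvChaseF p fl c (pvBord p i) (pvBord p i) + 1 else pvChaseF p fl c (pvBord p i) (pvBord p i)) = pvBord p (i + 1) := by
  have hb := pvBord_prop p i (by omega)
  have hbm : pvBord p i < p.length := lt_of_lt_of_le hb.1 (Nat.le_of_lt him)
  rw [pvChaseF_eq p fl c (pvBord p i) (pvBord p i) (Nat.le_refl _) hbm (fun t ht => Hfl t (by omega))]
  have H := pvChaseS_spec p fl c (p.take i) (pvBord p i) (pvBord p i) (Nat.le_refl _)
    (Nat.le_of_lt hbm) hb.2 (fun t ht => Hfl t (by omega))
  set r := pvChaseS p fl c (pvBord p i) (pvBord p i) with hrdef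
  obtain ⟨r1, r2, r3, r4, r5⟩ := H
  have hrm : r < p.length := lt_of_le_of_lt r1 hbm
  have htake : p.take (i + 1) = p.take i ++ [c] := by rw [pv_take_succ p i him, ← hc]
  have hKb := pvBord_prop p (i + 1) (by omega)
  set Kb := pvBord p (i + 1) with hKbdef
  by_cases hif : c = p.getD r ' '
  · rw [if_pos hif]
    apply Nat.le_antisymm
    · apply pvBord_max p (show r + 1 < i + 1 by omega)
      rw [htake, pv_take_succ p r hrm]
      exact pv_snoc_suffix_snoc.mpr ⟨r3, hif.symm⟩
    · by_cases hKb0 : Kb = 0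
      · omega
      · have hKb1 : 1 ≤ Kb := Nat.pos_of_ne_zero hKb0
        have hKbm : Kb - 1 < p.length := by omega
        have hdec : p.take Kb = p.take (Kb - 1) ++ [p.getD (Kb - 1) ' '] := by
          have := pv_take_succ p (Kb - 1) hKbm
          rwa [Nat.sub_add_cancel hKb1] at this
        have hsp := hKb.2
        rw [hdec, htake] at hsp
        obtain ⟨hsufK, heq⟩ := pv_snoc_suffix_snoc.mp hsp
        have h1 : Kb - 1 ≤ pvBord p i := pvBord_max p (show Kb - 1 < i by omega) hsufK
        have h2 : Kb - 1 ≤ r := r5 (Kb - 1) h1 hsufK hKbm heq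
        omega
  · rw [if_neg hif]
    have hr0 : r = 0 := by
      rcases r4 with h0 | hmc
      · exact h0
      · exact absurd hmc.2.symm hif
    apply Nat.le_antisymm
    · omega
    · by_cases hKb0 : Kb = 0
      · omega
      · exfalso
        have hKb1 : 1 ≤ Kb := Nat.pos_of_ne_zero hKb0
        have hKbm : Kb - 1 < p.length := by omega
        have hdec : p.take Kb = p.take (Kb - 1) ++ [p.getD (Kb - 1) ' '] := by
          have := pv_take_succ p (Kb - 1) hKbm
          rwa [Nat.sub_add_cancel hKb1] at this
        have hsp := hKb.2
        rw [hdec, htake] at hsp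
        obtain ⟨hsufK, heq⟩ := pv_snoc_suffix_snoc.mp hsp
        have h1 : Kb - 1 ≤ pvBord p i := pvBord_max p (show Kb - 1 < i by omega) hsufK
        have h2 : Kb - 1 ≤ r := r5 (Kb - 1) h1 hsufK hKbm heq
        have h00 : Kb - 1 = 0 := by omega
        rw [h00] at heq
        exact hif (by rw [hr0]; exact heq.symm)


theorem pv_drop_head (p : List Char) (i : Nat) (c : Char) (rest : List Char)
    (h : p.drop i = c :: rest) : p.getD i ' ' = c ∧ i < p.length := by
  have hi : i < p.length := by
    by_contra hh
    simp [List.drop_eq_nil_of_le (Nat.le_of_not_lt hh)] at h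
  refine ⟨?_, hi⟩
  have h0 : (p.drop i).getD 0 ' ' = p.getD i ' ' := by
    simp [List.getD_eq_getElem?_getD, List.getElem?_eq_getElem hi,
      List.getElem?_eq_getElem (show 0 < (p.drop i).length by simp [h]), List.getElem_drop]
  rw [h] at h0
  simpa using h0.symm

theorem pvBord_one (p : List Char) : pvBord p 1 = 0 := by
  unfold pvBord
  rw [show (1 : Nat) = 0 + 1 from rfl, Nat.findGreatest_succ]
  simp

theorem pvFailGo_spec (p : List Char) :
    ∀ rest fl k, 1 ≤ fl.length → fl.length ≤ p.length → rest = p.drop fl.length →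
    (∀ t, t < fl.length → fl.getD t 0 = pvBord p (t + 1)) → k = pvBord p fl.length →
    ((pvFailGo p rest fl k).length = p.length ∧ ∀ t, t < p.length → (pvFailGo p rest fl k).getD t 0 = pvBord p (t + 1)) := by
  intro rest
  induction rest with
  | nil =>
    intro fl k h1 hlen hrest Hfl hk
    have hge : p.length ≤ fl.length := by
      have := List.drop_eq_nil_iff.mp hrest.symm
      omega
    have heq : fl.length = p.length := by omega
    exact ⟨by simp [pvFailGo, heq], fun t ht => by simpa [pvFailGo] using Hfl t (by omega)⟩
  | cons c rest' ih =>
    intro fl k h1 hlen hrest Hfl hk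
    have hhd := pv_drop_head p fl.length c rest' hrest.symm
    subst hk
    simp only [pvFailGo]
    have hstep := pvStepF_spec p fl c fl.length h1 hhd.2 hhd.1.symm Hfl
    rw [hstep]
    apply ih
    · simp
    · simp; omega
    · have hdd : p.drop (fl.length + 1) = List.drop 1 (p.drop fl.length) := by
        rw [List.drop_drop]
      rw [List.length_append]
      simp only [List.length_cons, List.length_nil]
      rw [hdd, ← hrest]
      rfl
    · intro t ht
      simp only [List.length_append, List.length_cons, List.length_nil] at ht
      rcases Nat.lt_or_ge t fl.length with h | h
      · rw [List.getD_append _ _ _ t h]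
        exact Hfl t h
      · have : t = fl.length := by omega
        subst this
        simp
    · simp

theorem pvFail_spec (p : List Char) : ∀ t, t < p.length → (pvFail p).getD t 0 = pvBord p (t + 1) := by
  cases p with
  | nil => intro t ht; simp at ht
  | cons c0 rest =>
    have H := pvFailGo_spec (c0 :: rest) rest [0] 0 (by simp) (by simp) (by simp)
      (by
        intro t ht
        simp only [List.length_cons, List.length_nil] at ht
        have : t = 0 := by omega
        subst this
        simp [pvBord_one])
      (by simp [pvBord_one])
    exact fun t ht => H.2 t ht

theorem pvStreamGo_spec (p : List Char) (fl : List Nat)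
    (Hfl : ∀ t, t < p.length → fl.getD t 0 = pvBord p (t + 1)) :
    ∀ rest u, pvStreamGo p fl rest (pvKOf p u) = pvKOf p (u ++ rest) := by
  intro rest
  induction rest with
  | nil => intro u; simp [pvStreamGo]
  | cons c rest' ih =>
    intro u
    simp only [pvStreamGo]
    rw [pvStep_spec p fl c u Hfl]
    simpa using ih (u ++ [c])

theorem pvStream_eq (p w1 : List Char) : pvStreamGo p (pvFail p) w1 0 = pvKOf p w1 := by
  have h0 : pvKOf p [] = 0 := rfl
  have := pvStreamGo_spec p (pvFail p) (pvFail_spec p) w1 []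
  rw [h0] at this
  simpa using this

theorem pvKOf_le_len (w2 w1 : List Char) : pvKOf w2 w1 ≤ w1.length := by
  have hc := pvKOf_cand w2 w1
  have := hc.2.length_le
  simpa [List.length_take, Nat.min_eq_left hc.1] using this

theorem pvCond_of_cand (w1 w2 : List Char) {k : Nat} (hk : k ≤ w2.length)
    (hs : w2.take k <:+ w1) : w1.drop (w1.length - k) = w2.take k := by
  have hlen : (w2.take k).length = k := by simp [List.length_take, Nat.min_eq_left hk]
  have := List.suffix_iff_eq_drop.mp hs
  rw [hlen] at this
  exact this.symm

theorem pvALoop_spec (w1 w2 : List Char) :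
    ∀ n i, i + n = w1.length → (∀ j, j < i → w1.drop j ≠ w2.take (w1.length - j)) →
    pvALoop w1 w2 (List.range' i n) =
      ((pvKOf w2 w1 : Int), String.ofList (w1 ++ PySem.Chars.replace (w2.drop (pvKOf w2 w1)) ['#'] [])) := by
  intro n
  induction n with
  | zero =>
    intro i hi hinv
    have hK0 : pvKOf w2 w1 = 0 := by
      by_contra hne
      have hc := pvKOf_cand w2 w1
      have hK1 : 1 ≤ pvKOf w2 w1 := Nat.pos_of_ne_zero hne
      have hKl : pvKOf w2 w1 ≤ w1.length := pvKOf_le_len w2 w1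
      refine hinv (w1.length - pvKOf w2 w1) (by omega) ?_
      have harg : w1.length - (w1.length - pvKOf w2 w1) = pvKOf w2 w1 := by omega
      rw [harg]
      exact pvCond_of_cand w1 w2 hc.1 hc.2
    rw [hK0]
    simp [pvALoop]
  | succ n ih =>
    intro i hi hinv
    have hil : i < w1.length := by omega
    rw [List.range'_succ]
    simp only [pvALoop]
    have hcl : (w1.drop i).length = w1.length - i := by simp
    by_cases hcond : w1.drop i = w2.take ((w1.drop i).length)
    · rw [if_pos hcond]
      rw [hcl] at hcond
      have hkm : w1.length - i ≤ w2.length := by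
        have := congrArg List.length hcond
        simp only [List.length_drop, List.length_take] at this
        omega
      have hsuf : w2.take (w1.length - i) <:+ w1 := by
        rw [← hcond]
        exact List.drop_suffix i w1
      have hKge : w1.length - i ≤ pvKOf w2 w1 := pvKOf_max w2 w1 hkm hsuf
      have hKle : pvKOf w2 w1 ≤ w1.length - i := by
        by_contra hgt
        push Not at hgt
        have hc := pvKOf_cand w2 w1
        have hKl : pvKOf w2 w1 ≤ w1.length := pvKOf_le_len w2 w1
        refine hinv (w1.length - pvKOf w2 w1) (by omega) ?_
        have harg : w1.length - (w1.length - pvKOf w2 w1) = pvKOf w2 w1 := by omega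
        rw [harg]
        exact pvCond_of_cand w1 w2 hc.1 hc.2
      have hK : pvKOf w2 w1 = w1.length - i := by omega
      rw [hcl, hK]
    · rw [if_neg hcond]
      apply ih (i + 1) (by omega)
      intro j hj
      rcases Nat.lt_or_ge j i with h | h
      · exact hinv j h
      · have : j = i := by omega
        subst this
        rw [← hcl]
        exact hcond

-- ===== VERDICT (by name: the statement is the Claim_ definition above) =====
theorem calculate_suffix_spec : Claim_equal_calculate_suffix := by
  intro word1 word2 _hdom
  unfold Spec_calculate_suffix
  simp only [calculate_suffix, calculate_suffix_alt]
  have hpad : (if word1.toList.length < word2.toList.length then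
      word2.toList ++ List.replicate (((word1.toList.length : Int) - (word2.toList.length : Int)).toNat) '#'
      else word2.toList) = word2.toList := by
    split_ifs with h
    · rw [Int.toNat_eq_zero.mpr (by omega)]
      simp
    · rfl
  rw [hpad, List.range_eq_range']
  rw [pvALoop_spec word1.toList word2.toList word1.toList.length 0 (by omega)
    (fun j hj => absurd hj (Nat.not_lt_zero j))]
  rw [pvStream_eq word2.toList word1.toList]
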